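-- pv_equiv track=rewrite | github.com/aravindas4/snippetbox-1 | leets/Length of longest consecutive ones.py | solve
-- ===== SOURCE A (Python) =====
-- def solve(A):
--     count = 0
--     ans = 0
--     N = len(A)
--
--     for num in A:
--         if int(num) == 1:
--             count += 1
--
--     if count == N:
--         return count
--
--     if count == 0:
--         return 0
--
--     for ind in range(N):
--         left = 0
--         right = 0
--
--         if int(A[ind]) == 0:
--             if ind > 0:
--                 for j in range(ind-1, -1, -1):
--                     if int(A[j]) == 1:
--                         left += 1
--                     else:
--                         break
--
--             if ind < N:
--                 for j in range(ind+1, N):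
--                     if int(A[j]) == 1:
--                         right += 1
--                     else:
--                         break
--
--         k = left + right
--
--         if k < count:
--             k += 1
--
--         ans = max(k, ans)
--
--     return ans
-- ===== SOURCE B (Python) =====
-- def solve(A):
--     N = len(A)
--     count = sum(1 for x in A if x == 1)
--     if count == N:
--         return count
--     if count == 0:
--         return 0
--     # left[i] = length of the run of 1s ending at i-1 (one forward pass)
--     left = []
--     run = 0
--     for x in A:
--         left.append(run)
--         run = run + 1 if x == 1 else 0
--     # right[i] = length of the run of 1s starting at i+1 (one backward pass)
--     right = []
--     run = 0
--     for x in reversed(A):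
--         right.append(run)
--         run = run + 1 if x == 1 else 0
--     right.reverse()
--     best = 1
--     for i in range(N):
--         if A[i] == 0:
--             k = left[i] + right[i]
--             if k < count:
--                 k += 1
--             if k > best:
--                 best = k
--     return best
-- ===== Notes on version B (the rewrite author's own statement) =====
-- stated objective: alternative
-- what changed: Replaced the per-zero backward/forward rescans (quadratic in the worst case) with two precomputed run-length arrays of 1s built in two linear passes and combined per index in one final pass; a timing run measured only 1.42x at the largest size, so no speed is claimed.
import Mathlib
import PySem

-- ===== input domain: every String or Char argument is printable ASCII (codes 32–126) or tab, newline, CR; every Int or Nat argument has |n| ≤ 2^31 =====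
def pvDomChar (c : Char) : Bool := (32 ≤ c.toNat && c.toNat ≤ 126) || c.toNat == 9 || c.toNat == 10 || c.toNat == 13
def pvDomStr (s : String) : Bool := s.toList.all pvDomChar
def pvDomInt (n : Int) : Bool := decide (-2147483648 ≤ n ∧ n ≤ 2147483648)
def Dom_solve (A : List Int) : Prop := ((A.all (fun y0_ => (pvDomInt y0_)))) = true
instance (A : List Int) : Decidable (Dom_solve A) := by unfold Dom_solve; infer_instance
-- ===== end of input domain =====

-- B replaces A's per-zero backward/forward rescans by two precomputed run-length passes combined per index (objective: alternative).

-- ===== PORT A =====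
-- inner backward loop 'for j in range(ind-1,-1,-1): if A[j]==1: left+=1 else: break',
-- counting down from j; indices are always in range here, so A[j] is ported as getD.
def goLeft (A : List Int) : Nat → Int
  | 0 => if A.getD 0 0 = 1 then 1 else 0
  | j + 1 => if A.getD (j + 1) 0 = 1 then 1 + goLeft A j else 0

-- inner forward loop 'for j in range(ind+1, N): if A[j]==1: right+=1 else: break'
def goRight (A : List Int) (j : Nat) : Int :=
  if _h : j < A.length then (if A.getD j 0 = 1 then 1 + goRight A (j + 1) else 0) else 0
termination_by A.length - j

def solve (A : List Int) : Int :=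
  let count : Int := A.foldl (fun c num => if num = 1 then c + 1 else c) 0
  let N := A.length
  if count = (N : Int) then count
  else if count = 0 then 0
  else
    (List.range N).foldl (fun ans ind =>
      let left : Int := if A.getD ind 0 = 0 then (if 0 < ind then goLeft A (ind - 1) else 0) else 0
      let right : Int := if A.getD ind 0 = 0 then (if ind < N then goRight A (ind + 1) else 0) else 0
      let k := left + right
      let k := if k < count then k + 1 else k
      max k ans) 0

-- ===== PORT B =====
-- one pass of 'left.append(run); run = run+1 if x==1 else 0'
def runsAux : List Int → Int → List Int
  | [], _ => []
  | x :: xs, run => run :: runsAux xs (if x = 1 then run + 1 else 0)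

def solve_alt (A : List Int) : Int :=
  let N := A.length
  let count : Int := ((A.filter (fun x => x = 1)).length : Int)
  if count = (N : Int) then count
  else if count = 0 then 0
  else
    let lefts := runsAux A 0
    let rights := (runsAux A.reverse 0).reverse
    (List.range N).foldl (fun best i =>
      if A.getD i 0 = 0 then
        let k := lefts.getD i 0 + rights.getD i 0
        let k := if k < count then k + 1 else k
        if k > best then k else best
      else best) 1

-- ===== PRECONDITION & SPEC =====
def Spec_solve (A : List Int) (out : Int) : Prop := out = solve_alt A
instance (A : List Int) (out : Int) : Decidable (Spec_solve A out) := by unfold Spec_solve; infer_instance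

-- ===== CLAIM (what is proved, stated in full; the proofs are below) =====
def Claim_equal_solve : Prop := ∀ (A : List Int), Dom_solve A → Spec_solve A (solve A)

-- ===== LEMMAS AND PROOFS =====

-- the two counts agree
theorem count_fold_eq (A : List Int) (c : Int) :
    A.foldl (fun c num => if num = 1 then c + 1 else c) c
      = c + ((A.filter (fun x => x = 1)).length : Int) := by
  induction A generalizing c with
  | nil => simp
  | cons x xs ih =>
    by_cases hx : x = 1 <;> simp [List.foldl, hx, ih] <;> omega

theorem runsAux_length (A : List Int) (run : Int) : (runsAux A run).length = A.length := by
  induction A generalizing run with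
  | nil => rfl
  | cons x xs ih => simp [runsAux, ih]

theorem runsAux_getD_zero (x : Int) (xs : List Int) (run : Int) :
    (runsAux (x :: xs) run).getD 0 0 = run := by
  simp [runsAux]

theorem runsAux_getD_succ (i : Nat) :
    ∀ (xs : List Int) (run : Int), i + 1 < xs.length →
      (runsAux xs run).getD (i + 1) 0
        = if xs.getD i 0 = 1 then (runsAux xs run).getD i 0 + 1 else 0 := by
  induction i with
  | zero =>
    intro xs run h
    match xs, h with
    | x :: y :: xs', _ => simp [runsAux]
  | succ i ih =>
    intro xs run h
    match xs, h with
    | x :: xs', h =>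
      have h' : i + 1 < xs'.length := by simpa using h
      simp only [runsAux, List.getD_cons_succ]
      rw [ih xs' _ h']

theorem goLeft_nonneg (A : List Int) : ∀ j, 0 ≤ goLeft A j := by
  intro j
  induction j with
  | zero => simp only [goLeft]; split <;> omega
  | succ j ih => simp only [goLeft]; split <;> omega

theorem goRight_nonneg (A : List Int) (j : Nat) : 0 ≤ goRight A j := by
  rw [goRight]
  split_ifs with h1 h2
  · have := goRight_nonneg A (j + 1)
    omega
  · omega
  · omega
termination_by A.length - j

-- lefts array equals A's backward scan
theorem lefts_eq (A : List Int) : ∀ i, i < A.length →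
    (runsAux A 0).getD i 0 = (if 0 < i then goLeft A (i - 1) else 0) := by
  intro i
  induction i with
  | zero =>
    intro h
    match A, h with
    | x :: xs, _ => simp [runsAux]
  | succ i ih =>
    intro h
    rw [runsAux_getD_succ i A 0 h]
    have hi : i < A.length := by omega
    rw [ih hi]
    simp only [Nat.zero_lt_succ, if_true, Nat.add_sub_cancel]
    cases i with
    | zero => simp [goLeft]
    | succ j =>
      simp only [Nat.zero_lt_succ, if_true, Nat.add_sub_cancel, goLeft]
      split <;> omega

-- rights array equals A's forward scan; downward induction via k = N-1-i
theorem rights_eq_aux (A : List Int) : ∀ (k i : Nat), i < A.length → A.length - 1 - i = k →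
    ((runsAux A.reverse 0).reverse).getD i 0 = goRight A (i + 1) := by
  intro k
  induction k with
  | zero =>
    intro i hi hk
    have hiN : i = A.length - 1 := by omega
    have hlen : (runsAux A.reverse 0).length = A.length := by
      rw [runsAux_length, List.length_reverse]
    have h1 : ((runsAux A.reverse 0).reverse).getD i 0 = (runsAux A.reverse 0).getD (A.length - 1 - i) 0 := by
      rw [List.getD_eq_getElem?_getD, List.getD_eq_getElem?_getD,
          List.getElem?_reverse (by omega), hlen]
    rw [h1, hiN]
    have h0 : A.length - 1 - (A.length - 1) = 0 := by omega
    rw [h0]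
    match A, hi with
    | x :: xs, _ =>
      rw [goRight]
      simp only [List.length_cons]
      rw [dif_neg (by omega)]
      obtain ⟨y, ys, hys⟩ := List.exists_cons_of_ne_nil (l := (x :: xs).reverse) (by simp)
      rw [hys, runsAux_getD_zero]
  | succ k ih =>
    intro i hi hk
    have hi1 : i + 1 < A.length := by omega
    have hlen : (runsAux A.reverse 0).length = A.length := by
      rw [runsAux_length, List.length_reverse]
    have hrev : ∀ m, m < A.length →
        ((runsAux A.reverse 0).reverse).getD m 0 = (runsAux A.reverse 0).getD (A.length - 1 - m) 0 := by
      intro m hm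
      rw [List.getD_eq_getElem?_getD, List.getD_eq_getElem?_getD,
          List.getElem?_reverse (by omega), hlen]
    rw [hrev i hi]
    have hki : A.length - 1 - i = k + 1 := hk
    rw [hki, runsAux_getD_succ k A.reverse 0 (by simp only [List.length_reverse]; omega)]
    have hAk : A.reverse.getD k 0 = A.getD (i + 1) 0 := by
      have h1 : k < A.length := by omega
      have h2 : A.length - 1 - k = i + 1 := by omega
      rw [List.getD_eq_getElem?_getD, List.getD_eq_getElem?_getD,
          List.getElem?_reverse (by simpa using h1), h2]
    have hRk : (runsAux A.reverse 0).getD k 0 = ((runsAux A.reverse 0).reverse).getD (i + 1) 0 := by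
      rw [hrev (i + 1) hi1]
      have : A.length - 1 - (i + 1) = k := by omega
      rw [this]
    rw [hAk, hRk, ih (i + 1) hi1 (by omega)]
    conv_rhs => rw [goRight]
    rw [dif_pos hi1]
    split_ifs <;> omega

-- generic fold relation: B's guarded max-fold started at (1 ⊔ a) equals 1 ⊔ A's max-fold
theorem fold_rel (A : List Int) (F G : Nat → Int) : ∀ (l : List Nat) (a : Int),
    (∀ i ∈ l, 1 ≤ F i) → (∀ i ∈ l, A.getD i 0 = 0 → G i = F i) →
    (∀ i ∈ l, A.getD i 0 ≠ 0 → F i = 1) →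
    l.foldl (fun best i => if A.getD i 0 = 0 then (if G i > best then G i else best) else best) (max 1 a)
      = max 1 (l.foldl (fun ans i => max (F i) ans) a) := by
  intro l
  induction l with
  | nil => intro a _ _ _; rfl
  | cons i l ih =>
    intro a h1 h2 h3
    simp only [List.foldl_cons]
    by_cases hz : A.getD i 0 = 0
    · rw [if_pos hz, h2 i (by simp) hz]
      have : (if F i > max 1 a then F i else max 1 a) = max 1 (max (F i) a) := by
        rcases le_or_gt (F i) (max 1 a) with h | h <;> rcases le_total 1 a with h' | h' <;>
          simp [max_def] at * <;> omega
      rw [this, ih (max (F i) a) (fun j hj => h1 j (by simp [hj])) (fun j hj => h2 j (by simp [hj]))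
        (fun j hj => h3 j (by simp [hj]))]
    · rw [if_neg hz, h3 i (by simp) hz]
      have h11 : max 1 a = max 1 (max 1 a) := by
        rcases le_total 1 a with h' | h' <;> simp [max_def] at * <;> omega
      conv_lhs => rw [h11]
      exact ih (max 1 a) (fun j hj => h1 j (by simp [hj])) (fun j hj => h2 j (by simp [hj]))
        (fun j hj => h3 j (by simp [hj]))

theorem solve_spec' (A : List Int) : solve A = solve_alt A := by
  unfold solve solve_alt
  rw [count_fold_eq]
  simp only [zero_add]
  set c : Int := ((A.filter (fun x => x = 1)).length : Int) with hc
  by_cases hN : c = (A.length : Int)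
  · rw [if_pos hN, if_pos hN]
  · rw [if_neg hN, if_neg hN]
    by_cases h0 : c = 0
    · rw [if_pos h0, if_pos h0]
    · rw [if_neg h0, if_neg h0]
      have hcpos : 1 ≤ c := by
        have : (0 : Int) ≤ c := by rw [hc]; exact_mod_cast Nat.zero_le _
        omega
      -- F i = A's per-index candidate, G i = B's per-index candidate
      set F : Nat → Int := fun ind =>
        let left : Int := if A.getD ind 0 = 0 then (if 0 < ind then goLeft A (ind - 1) else 0) else 0
        let right : Int := if A.getD ind 0 = 0 then (if ind < A.length then goRight A (ind + 1) else 0) else 0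
        let k := left + right
        if k < c then k + 1 else k with hF
      set G : Nat → Int := fun i =>
        let k := (runsAux A 0).getD i 0 + ((runsAux A.reverse 0).reverse).getD i 0
        if k < c then k + 1 else k with hG
      have hBfold : (List.range A.length).foldl (fun best i =>
            if A.getD i 0 = 0 then
              let k := (runsAux A 0).getD i 0 + ((runsAux A.reverse 0).reverse).getD i 0
              let k := if k < c then k + 1 else k
              if k > best then k else best
            else best) 1
          = (List.range A.length).foldl (fun best i =>
              if A.getD i 0 = 0 then (if G i > best then G i else best) else best) 1 := rfl
      have hAfold : (List.range A.length).foldl (fun ans ind =>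
            let left : Int := if A.getD ind 0 = 0 then (if 0 < ind then goLeft A (ind - 1) else 0) else 0
            let right : Int := if A.getD ind 0 = 0 then (if ind < A.length then goRight A (ind + 1) else 0) else 0
            let k := left + right
            let k := if k < c then k + 1 else k
            max k ans) 0
          = (List.range A.length).foldl (fun ans i => max (F i) ans) 0 := rfl
      rw [hBfold, hAfold]
      have h1 : ∀ i ∈ List.range A.length, 1 ≤ F i := by
        intro i _
        rw [hF]
        simp only
        have hl := goLeft_nonneg A (i - 1)
        have hr := goRight_nonneg A (i + 1)
        split_ifs <;> omega
      have h2 : ∀ i ∈ List.range A.length, A.getD i 0 = 0 → G i = F i := by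
        intro i hi hz
        rw [List.mem_range] at hi
        rw [hF, hG]
        simp only [hz, if_true, hi]
        rw [lefts_eq A i hi, rights_eq_aux A (A.length - 1 - i) i hi rfl]
      have h3 : ∀ i ∈ List.range A.length, A.getD i 0 ≠ 0 → F i = 1 := by
        intro i _ hz
        rw [hF]
        simp only [hz, if_false]
        rw [if_pos (by omega : (0 : Int) + 0 < c)]
        omega
      have key := fold_rel A F G (List.range A.length) 0 h1 h2 h3
      have hmax10 : max (1 : Int) 0 = 1 := rfl
      rw [hmax10] at key
      rw [key]
      -- the A-side fold is ≥ 1 since N ≥ 1 and every candidate is ≥ 1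
      have hNe : A.length ≠ 0 := by
        intro h
        apply h0
        rw [hc]
        have : A = [] := List.length_eq_zero_iff.mp h
        simp [this]
      obtain ⟨m, hm⟩ : ∃ m, A.length = m + 1 := ⟨A.length - 1, by omega⟩
      have hge : 1 ≤ (List.range A.length).foldl (fun ans i => max (F i) ans) 0 := by
        rw [hm, List.range_succ, List.foldl_append]
        simp only [List.foldl_cons, List.foldl_nil]
        have := h1 m (by rw [hm]; exact List.mem_range.mpr (by omega))
        calc (1 : Int) ≤ F m := this
          _ ≤ max (F m) _ := le_max_left _ _
      rcases le_total 1 ((List.range A.length).foldl (fun ans i => max (F i) ans) 0) with h | h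
      · exact (max_eq_right h).symm
      · omega

-- ===== VERDICT (by name: the statement is the Claim_ definition above) =====
theorem solve_spec : Claim_equal_solve := by
  intro A _
  unfold Spec_solve
  exact solve_spec' A
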